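-- pv_equiv track=rewrite | github.com/JiayuJeff/CostBench | env/utils/example_generator.py | _contiguous_composites
-- ===== SOURCE A (Python) =====
-- from typing import List, Tuple
--
-- def _contiguous_composites(names: List[str]) -> List[str]:
--     """All contiguous composite tool names of length 2..(n-1), left-to-right by length then start.
--
--     Example for [A,B,C,D,E]: AB, BC, CD, DE, ABC, BCD, CDE, ABCD, BCDE
--     """
--     n = len(names)
--     out: List[str] = []
--     for length in range(2, max(2, n)):
--         if length >= n:
--             break
--         for start in range(0, n - length + 1):
--             out.append("".join(names[start : start + length]))
--     return out
-- ===== SOURCE B (Python) =====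
-- from typing import List
--
-- def _contiguous_composites(names: List[str]) -> List[str]:
--     """Rolling-row build: each length-L row is the length-(L-1) row extended by one name."""
--     out: List[str] = []
--     prev = list(names)  # length-1 row
--     L = 2
--     while L < len(names):
--         prev = [p + x for p, x in zip(prev, names[L - 1:])]
--         out.extend(prev)
--         L += 1
--     return out
-- ===== Notes on version B (the rewrite author's own statement) =====
-- stated objective: alternative
-- what changed: Instead of re-slicing and re-joining names for every (length, start) pair, B carries a rolling row of the previous length's composites and extends each by one name via zip, emitting each row as it is built.
import Mathlib
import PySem

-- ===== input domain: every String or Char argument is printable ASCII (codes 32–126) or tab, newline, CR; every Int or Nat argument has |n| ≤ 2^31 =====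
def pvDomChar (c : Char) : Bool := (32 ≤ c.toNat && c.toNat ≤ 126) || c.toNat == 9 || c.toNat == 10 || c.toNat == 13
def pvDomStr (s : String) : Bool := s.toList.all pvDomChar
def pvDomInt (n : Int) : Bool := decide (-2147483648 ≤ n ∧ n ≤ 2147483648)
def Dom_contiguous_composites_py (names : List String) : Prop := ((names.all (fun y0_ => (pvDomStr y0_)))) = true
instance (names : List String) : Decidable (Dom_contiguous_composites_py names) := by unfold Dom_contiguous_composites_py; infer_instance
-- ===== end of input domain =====

-- B replaces A's per-substring slice-and-join with a rolling row carried across lengths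
-- (each length-L row is the length-(L-1) row extended by one name); objective: alternative (same cost, no per-substring slice/join).

-- ===== PORT A =====
-- inner 'for start in range(0, n - length + 1): out.append("".join(names[start:start+length]))'
def ccA_inner (names : List String) (n length : Int) (out : List String) : List String :=
  (PySem.List.pyRange 0 (n - length + 1) 1).foldl
    (fun acc start =>
      acc ++ [PySem.Str.join "" (PySem.List.slice names (some start) (some (start + length)))]) out

-- outer 'for length in range(2, max(2, n)): if length >= n: break …'
def ccA_outer (names : List String) (n : Int) : List Int → List String → List String
  | [], out => out
  | length :: rest, out =>
    if length ≥ n then out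
    else ccA_outer names n rest (ccA_inner names n length out)

def contiguous_composites_py (names : List String) : List String :=
  ccA_outer names (names.length : Int) (PySem.List.pyRange 2 (max 2 (names.length : Int)) 1) []

-- ===== PORT B =====
-- 'while L < len(names): prev = [p + x for p, x in zip(prev, names[L-1:])]; out.extend(prev); L += 1'
-- (the while loop runs exactly len(names) - 2 times; that count is the structural fuel)
def ccB_loop (names : List String) : Nat → Int → List String → List String → List String
  | 0, _L, _prev, out => out
  | k + 1, L, prev, out =>
    let cur := List.zipWith (fun p x => p ++ x) prev (PySem.List.slice names (some (L - 1)) none)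
    ccB_loop names k (L + 1) cur (out ++ cur)

def contiguous_composites_py_alt (names : List String) : List String :=
  ccB_loop names (names.length - 2) 2 names []

-- ===== PRECONDITION & SPEC =====
def Spec_contiguous_composites_py (names : List String) (out : List String) : Prop := out = contiguous_composites_py_alt names
instance (names : List String) (out : List String) : Decidable (Spec_contiguous_composites_py names out) := by unfold Spec_contiguous_composites_py; infer_instance

-- ===== CLAIM (what is proved, stated in full; the proofs are below) =====
def Claim_equal_contiguous_composites_py : Prop := ∀ (names : List String), Dom_contiguous_composites_py names → Spec_contiguous_composites_py names (contiguous_composites_py names)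

-- ===== LEMMAS AND PROOFS =====

-- two strings with the same character list are equal
theorem pvStrEq {s t : String} (h : s.toList = t.toList) : s = t := by
  have h2 := congrArg String.ofList h
  simpa using h2

-- Chars.join with empty separator distributes over a snoc
theorem pvCharsJoinSnoc (ps : List (List Char)) (q : List Char) :
    PySem.Chars.join [] (ps ++ [q]) = PySem.Chars.join [] ps ++ q := by
  induction ps with
  | nil => simp [PySem.Chars.join_nil, PySem.Chars.join_singleton]
  | cons p ps ih =>
    cases ps with
    | nil => simp [PySem.Chars.join_singleton, PySem.Chars.join_cons_cons]
    | cons p2 rest =>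
      rw [List.cons_append, List.cons_append, PySem.Chars.join_cons_cons]
      rw [List.cons_append] at ih
      rw [ih, PySem.Chars.join_cons_cons]
      simp [List.append_assoc]

theorem pvJoinSnoc (ys : List String) (z : String) :
    PySem.Str.join "" (ys ++ [z]) = PySem.Str.join "" ys ++ z := by
  apply pvStrEq
  rw [String.toList_append, PySem.Str.toList_join, PySem.Str.toList_join]
  have hsep : ("" : String).toList = ([] : List Char) := rfl
  rw [hsep, List.map_append, List.map_cons, List.map_nil, pvCharsJoinSnoc]

theorem pvJoinSingle (z : String) : PySem.Str.join "" [z] = z := by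
  apply pvStrEq
  rw [PySem.Str.toList_join]
  have hsep : ("" : String).toList = ([] : List Char) := rfl
  rw [hsep, List.map_cons, List.map_nil, PySem.Chars.join_singleton]

-- the row of all length-L composites, by start position
def ccRow (names : List String) (L : Nat) : List String :=
  (List.range (names.length - L + 1)).map
    (fun s => PySem.Str.join "" ((names.drop s).take L))

theorem ccRow_one (names : List String) (h : 1 ≤ names.length) :
    ccRow names 1 = names := by
  apply List.ext_getElem
  · simp [ccRow]; omega
  · intro s h1 h2
    simp only [ccRow, List.getElem_map, List.getElem_range]
    have hs : s < names.length := h2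
    have : (names.drop s).take 1 = [names[s]] := by
      rw [List.take_one]
      simp [List.head?_drop, List.getElem?_eq_getElem hs]
    rw [this, pvJoinSingle]

theorem ccRow_step (names : List String) (ℓ : Nat) (h2 : ℓ + 1 ≤ names.length) :
    List.zipWith (fun p x => p ++ x) (ccRow names ℓ) (names.drop ℓ)
      = ccRow names (ℓ + 1) := by
  apply List.ext_getElem
  · simp [ccRow]; omega
  · intro s hs1 hs2
    have hlen : s < names.length - (ℓ + 1) + 1 := by simpa [ccRow] using hs2
    have hsl : s + ℓ < names.length := by omega
    have hℓd : ℓ < (names.drop s).length := by simp; omega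
    simp only [List.getElem_zipWith, ccRow, List.getElem_map, List.getElem_range,
      List.getElem_drop]
    rw [List.take_add_one, List.getElem?_eq_getElem hℓd]
    simp [pvJoinSnoc, List.getElem_drop, Nat.add_comm]

-- the B loop accumulates the rows ℓ+1, ℓ+2, …, ℓ+k
theorem ccB_loop_eq (names : List String) :
    ∀ (k ℓ : Nat) (out : List String), 1 ≤ ℓ → ℓ + k ≤ names.length →
      ccB_loop names k ((ℓ : Int) + 1) (ccRow names ℓ) out
        = out ++ ((List.range k).map (fun i => ccRow names (ℓ + 1 + i))).flatten := by
  intro k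
  induction k with
  | zero => intro ℓ out _ _; simp [ccB_loop]
  | succ k ih =>
    intro ℓ out h1 h2
    have hsl : PySem.List.slice names (some ((ℓ : Int) + 1 - 1)) none = names.drop ℓ := by
      have : ((ℓ : Int) + 1 - 1) = (ℓ : Int) := by ring
      rw [this, PySem.List.slice_from names (by positivity)]
      simp
    have hstep : List.zipWith (fun p x => p ++ x) (ccRow names ℓ) (names.drop ℓ)
        = ccRow names (ℓ + 1) := ccRow_step names ℓ (by omega)
    have hcast : ((ℓ : Int) + 1 + 1) = (((ℓ + 1 : Nat) : Int) + 1) := by push_cast; ring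
    simp only [ccB_loop, hsl, hstep, hcast]
    rw [ih (ℓ + 1) (out ++ ccRow names (ℓ + 1)) (by omega) (by omega)]
    rw [List.range_succ_eq_map, List.map_cons, List.map_map, List.flatten_cons]
    have hmaps : List.map ((fun i => ccRow names (ℓ + 1 + i)) ∘ Nat.succ) (List.range k)
        = List.map (fun i => ccRow names (ℓ + 1 + 1 + i)) (List.range k) := by
      apply List.map_congr_left
      intro i _
      simp only [Function.comp_apply]
      congr 1
      omega
    rw [hmaps]
    simp [List.append_assoc]

-- A's inner loop appends exactly the length-ℓ row
theorem ccA_inner_eq (names : List String) (ℓ : Nat) (out : List String)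
    (h : ℓ ≤ names.length) :
    ccA_inner names (names.length : Int) (ℓ : Int) out = out ++ ccRow names ℓ := by
  unfold ccA_inner
  rw [PySem.List.foldl_append_singleton_eq_map]
  congr 1
  rw [PySem.List.pyRange_one, List.map_map]
  unfold ccRow
  have hn : (((names.length : Int) - (ℓ : Int) + 1) - 0).toNat = names.length - ℓ + 1 := by
    omega
  rw [hn]
  apply List.map_congr_left
  intro k _
  simp only [Function.comp_apply, zero_add]
  rw [show ((k : Int) + (ℓ : Int)) = ((k : Int) + (ℓ : Int)) from rfl]
  rw [PySem.List.slice_natCast_add names k ℓ]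

-- A's outer loop over in-range lengths concatenates the rows
theorem ccA_outer_eq (names : List String) :
    ∀ (ls : List Int) (out : List String),
      (∀ x ∈ ls, ∃ m : Nat, x = (m : Int) ∧ m < names.length) →
      ccA_outer names (names.length : Int) ls out
        = out ++ (ls.map (fun L => ccRow names L.toNat)).flatten := by
  intro ls
  induction ls with
  | nil => intro out _; simp [ccA_outer]
  | cons x rest ih =>
    intro out hx
    obtain ⟨m, hm1, hm2⟩ := hx x (List.mem_cons_self ..)
    have hguard : ¬ ((names.length : Int) ≤ x) := by omega
    simp only [ccA_outer, ge_iff_le, hguard, if_false]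
    rw [hm1, ccA_inner_eq names m out (by omega)]
    rw [ih _ (fun y hy => hx y (List.mem_cons_of_mem _ hy))]
    simp [List.append_assoc]

-- ===== VERDICT (by name: the statement is the Claim_ definition above) =====
theorem contiguous_composites_py_spec : Claim_equal_contiguous_composites_py := by
  intro names _
  unfold Spec_contiguous_composites_py contiguous_composites_py contiguous_composites_py_alt
  by_cases hn : names.length ≤ 2
  · -- no lengths: both sides are []
    have hr : PySem.List.pyRange 2 (max 2 (names.length : Int)) 1 = [] := by
      apply PySem.List.pyRange_one_eq_nil
      omega
    have hf : names.length - 2 = 0 := by omega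
    rw [hr, hf]
    simp [ccA_outer, ccB_loop]
  · -- n ≥ 3
    have hn3 : 2 < names.length := by omega
    have hmax : max 2 ((names.length : Int)) = (names.length : Int) := by omega
    rw [hmax, PySem.List.pyRange_one]
    have hcond : ∀ x ∈ List.map (fun k : Nat => (2 : Int) + (k : Int))
        (List.range (((names.length : Int)) - 2).toNat), ∃ m : Nat, x = (m : Int) ∧ m < names.length := by
      intro x hx
      simp only [List.mem_map, List.mem_range] at hx
      obtain ⟨k, hk1, hk2⟩ := hx
      exact ⟨2 + k, by omega, by omega⟩
    rw [ccA_outer_eq names _ [] hcond]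
    have hB := ccB_loop_eq names (names.length - 2) 1 [] (by omega) (by omega)
    rw [ccRow_one names (by omega)] at hB
    rw [show (((1 : Nat) : Int) + 1) = (2 : Int) from by norm_num] at hB
    rw [hB]
    simp only [List.nil_append, List.map_map]
    congr 1
    have hlen : (((names.length : Int)) - 2).toNat = names.length - 2 := by omega
    rw [hlen]
    apply List.map_congr_left
    intro k hk
    have h : ((2 : Int) + (k : Int)).toNat = 1 + 1 + k := by omega
    simp [h]
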